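-- pv_equiv track=rewrite | github.com/minhoipark/Algorithm | cordingtest_0518.py | solution
-- ===== SOURCE A (Python) =====
-- def solution(answers):
--     no1 = [1,2,3,4,5]
--     no2 = [2,1,2,3,2,4,2,5]
--     no3 = [3,3,1,1,2,2,4,4,5,5]
--     score =[0,0,0]
--     result = []
--
--     for i, answer in enumerate(answers):
--         if answer == no1[i%len(no1)]:
--             score[0] += 1
--         if answer == no2[i%len(no2)]:
--             score[1] += 1
--         if answer ==no3[i%len(no3)]:
--             score[2] +=1
--
--     for i, s in enumerate(score):
--         if s == max(score):
--             result.append(i+1)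
--
--     return result
-- ===== SOURCE B (Python) =====
-- def solution(answers):
--     # The three patterns all repeat with period dividing 40 (lcm of 5, 8, 10),
--     # so the pattern value at position i depends only on i % 40.  Build a
--     # histogram of (i % 40, answer) pairs in one pass, then compute each
--     # supervisor's score from the histogram alone with 40 lookups.
--     hist = {}
--     for i, a in enumerate(answers):
--         key = (i % 40, a)
--         hist[key] = hist.get(key, 0) + 1
--     patterns = [[1, 2, 3, 4, 5],
--                 [2, 1, 2, 3, 2, 4, 2, 5],
--                 [3, 3, 1, 1, 2, 2, 4, 4, 5, 5]]
--     scores = [sum(hist.get((r, pat[r % len(pat)]), 0) for r in range(40))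
--               for pat in patterns]
--     m = max(scores)
--     return [k + 1 for k, s in enumerate(scores) if s == m]
-- ===== Notes on version B (the rewrite author's own statement) =====
-- stated objective: alternative
-- what changed: A scans answers once updating three counters by direct pattern comparison; B instead builds a histogram keyed by (position mod 40, answer) -- 40 = lcm of the pattern periods -- and then computes each supervisor's score purely from the histogram with 40 lookups per pattern, never re-touching the answers.
import Mathlib
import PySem

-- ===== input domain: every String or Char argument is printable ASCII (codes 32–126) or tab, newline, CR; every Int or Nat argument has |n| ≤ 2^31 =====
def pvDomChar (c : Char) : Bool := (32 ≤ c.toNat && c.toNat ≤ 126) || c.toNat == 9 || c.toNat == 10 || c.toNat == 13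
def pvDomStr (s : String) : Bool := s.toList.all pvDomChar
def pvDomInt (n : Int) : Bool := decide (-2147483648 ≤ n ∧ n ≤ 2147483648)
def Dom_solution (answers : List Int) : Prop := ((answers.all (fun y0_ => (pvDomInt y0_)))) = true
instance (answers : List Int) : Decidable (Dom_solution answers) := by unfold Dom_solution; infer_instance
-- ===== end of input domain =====

-- B replaces A's direct per-answer pattern comparisons by a histogram keyed by
-- (position mod 40, answer) — 40 = lcm of the pattern periods — from which each
-- supervisor's score is computed with 40 lookups (objective: alternative, same O(n)).

-- ===== PORT A =====
-- score = [0,0,0] (a fixed length-3 list of counters) is modeled as a triple of Ints.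
def solution (answers : List Int) : List Int :=
  let no1 : List Int := [1,2,3,4,5]
  let no2 : List Int := [2,1,2,3,2,4,2,5]
  let no3 : List Int := [3,3,1,1,2,2,4,4,5,5]
  let score := (PySem.List.enumerate answers 0).foldl
    (fun (sc : Int × Int × Int) p =>
      let sc := if p.2 = PySem.List.pyGetD no1 (PySem.Int.mod p.1 (no1.length : Int)) 0 then (sc.1 + 1, sc.2.1, sc.2.2) else sc
      let sc := if p.2 = PySem.List.pyGetD no2 (PySem.Int.mod p.1 (no2.length : Int)) 0 then (sc.1, sc.2.1 + 1, sc.2.2) else sc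
      let sc := if p.2 = PySem.List.pyGetD no3 (PySem.Int.mod p.1 (no3.length : Int)) 0 then (sc.1, sc.2.1, sc.2.2 + 1) else sc
      sc) ((0 : Int), (0 : Int), (0 : Int))
  let scoreL : List Int := [score.1, score.2.1, score.2.2]
  (PySem.List.enumerate scoreL 0).foldl
    (fun result p =>
      if p.2 = (PySem.List.max? scoreL (fun y => y)).getD 0 then result ++ [p.1 + 1] else result) []

-- ===== PORT B =====
def solution_alt (answers : List Int) : List Int :=
  let hist := (PySem.List.enumerate answers 0).foldl
    (fun (d : PySem.Dict (Int × Int) Int) p =>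
      let key := (PySem.Int.mod p.1 40, p.2)
      d.insert key (d.getD key 0 + 1)) PySem.Dict.empty
  let patterns : List (List Int) := [[1,2,3,4,5],[2,1,2,3,2,4,2,5],[3,3,1,1,2,2,4,4,5,5]]
  let scores := patterns.map (fun pat =>
    ((PySem.List.pyRange 0 40 1).map
      (fun r => hist.getD (r, PySem.List.pyGetD pat (PySem.Int.mod r (pat.length : Int)) 0) 0)).sum)
  let m := PySem.List.maxD scores (fun y => y) 0
  (PySem.List.enumerate scores 0).filterMap (fun p => if p.2 = m then some (p.1 + 1) else none)

-- ===== PRECONDITION & SPEC =====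
def Spec_solution (answers : List Int) (out : List Int) : Prop := out = solution_alt answers
instance (answers : List Int) (out : List Int) : Decidable (Spec_solution answers out) := by unfold Spec_solution; infer_instance

-- ===== CLAIM =====
def Claim_equal_solution : Prop := ∀ (answers : List Int), Dom_solution answers → Spec_solution answers (solution answers)

-- ===== LEMMAS AND PROOFS =====

-- A's one-pass loop with three counters equals three independent indicator sums.
lemma fold_counts (q1 q2 q3 : Int × Int → Prop) [DecidablePred q1] [DecidablePred q2] [DecidablePred q3] :
    ∀ (l : List (Int × Int)) (a b c : Int),
    l.foldl (fun (sc : Int × Int × Int) p =>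
      let sc := if q1 p then (sc.1 + 1, sc.2.1, sc.2.2) else sc
      let sc := if q2 p then (sc.1, sc.2.1 + 1, sc.2.2) else sc
      let sc := if q3 p then (sc.1, sc.2.1, sc.2.2 + 1) else sc
      sc) (a, b, c)
    = (a + (l.map (fun p => if q1 p then (1:Int) else 0)).sum,
       b + (l.map (fun p => if q2 p then (1:Int) else 0)).sum,
       c + (l.map (fun p => if q3 p then (1:Int) else 0)).sum) := by
  intro l
  induction l with
  | nil => intro a b c; simp
  | cons x t ih =>
      intro a b c
      simp only [List.foldl_cons, List.map_cons, List.sum_cons]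
      split_ifs <;> simp [ih] <;> ring_nf <;> simp

-- a single pair q is counted exactly once over a duplicate-free list of first components
lemma sum_ind (f : Int → Int) (q : Int × Int) :
    ∀ (rs : List Int), rs.Nodup → q.1 ∈ rs →
      (rs.map (fun r => if q = (r, f r) then (1:Int) else 0)).sum
        = if q.2 = f q.1 then 1 else 0 := by
  intro rs
  induction rs with
  | nil => intro _ h; cases h
  | cons r t ih =>
      intro hnd hmem
      simp only [List.map_cons, List.sum_cons]
      rcases List.mem_cons.mp hmem with h1 | h1
      · have ht : (t.map (fun r => if q = (r, f r) then (1:Int) else 0)).sum = 0 := by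
          apply List.sum_eq_zero
          intro x hx
          rcases List.mem_map.mp hx with ⟨r', hr', hxe⟩
          have : q ≠ (r', f r') := by
            intro he
            have : q.1 = r' := by rw [he]
            exact (List.nodup_cons.mp hnd).1 (h1 ▸ this ▸ hr')
          simp [this] at hxe; omega
        rw [ht]
        subst h1
        by_cases h2 : q.2 = f q.1
        · have he : q = (q.1, f q.1) := Prod.ext rfl h2
          rw [if_pos he, if_pos h2]; norm_num
        · have he : q ≠ (q.1, f q.1) := fun he => h2 (congrArg Prod.snd he)
          rw [if_neg he, if_neg h2]; norm_num
      · have hr : q ≠ (r, f r) := by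
          intro he
          have : q.1 = r := congrArg Prod.fst he
          exact (List.nodup_cons.mp hnd).1 (this ▸ h1)
        rw [ih (List.nodup_cons.mp hnd).2 h1]
        simp [hr]

-- summing per-residue counts over all residues counts each pair once
lemma count_sum (f : Int → Int) :
    ∀ (K : List (Int × Int)) (rs : List Int), rs.Nodup → (∀ q ∈ K, q.1 ∈ rs) →
      (rs.map (fun r => (K.count (r, f r) : Int))).sum
        = (K.map (fun q => if q.2 = f q.1 then (1:Int) else 0)).sum := by
  intro K
  induction K with
  | nil => intro rs _ _; simp
  | cons q K' ih =>
      intro rs hnd hmem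
      have hsplit : (rs.map (fun r => ((q :: K').count (r, f r) : Int))).sum
          = (rs.map (fun r => (K'.count (r, f r) : Int))).sum
            + (rs.map (fun r => if q = (r, f r) then (1:Int) else 0)).sum := by
        rw [← List.sum_map_add]
        apply congrArg
        apply List.map_congr_left
        intro r _
        by_cases h : q = (r, f r)
        · simp [h]
        · have h' : ¬ ((r, f r) = q) := fun he => h he.symm
          simp [h]
      rw [hsplit, ih rs hnd (fun p hp => hmem p (List.mem_cons_of_mem _ hp)),
          sum_ind f q rs hnd (hmem q (List.mem_cons_self))]
      simp [add_comm]

-- each supervisor's histogram-based score equals the direct indicator sum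
lemma score_eq (pat : List Int) (hdvd : pat.length ∣ 40) (answers : List Int) :
    ((PySem.List.pyRange 0 40 1).map
      (fun r => ((PySem.List.enumerate answers 0).foldl
        (fun (d : PySem.Dict (Int × Int) Int) p =>
          let key := (PySem.Int.mod p.1 40, p.2)
          d.insert key (d.getD key 0 + 1)) PySem.Dict.empty).getD
        (r, PySem.List.pyGetD pat (PySem.Int.mod r (pat.length : Int)) 0) 0)).sum
    = ((PySem.List.enumerate answers 0).map
        (fun p => if p.2 = PySem.List.pyGetD pat (PySem.Int.mod p.1 (pat.length : Int)) 0 then (1:Int) else 0)).sum := by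
  set l := PySem.List.enumerate answers 0 with hl
  set K := l.map (fun p => ((PySem.Int.mod p.1 40, p.2) : Int × Int)) with hK
  have hfold : l.foldl
      (fun (d : PySem.Dict (Int × Int) Int) p =>
        let key := (PySem.Int.mod p.1 40, p.2)
        d.insert key (d.getD key 0 + 1)) PySem.Dict.empty
      = K.foldl (fun d x => d.insert x (d.getD x 0 + 1)) PySem.Dict.empty := by
    rw [hK, List.foldl_map]
  rw [hfold]
  have hmemK : ∀ q ∈ K, q.1 ∈ PySem.List.pyRange 0 40 1 := by
    intro q hq
    rcases List.mem_map.mp hq with ⟨p, hp, hqe⟩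
    rcases (PySem.List.mem_enumerate_iff _ 0 _).mp hp with ⟨k, hk, hpe⟩
    rw [PySem.List.mem_pyRange_one, ← hqe]
    have h40 : (0:Int) < 40 := by norm_num
    exact ⟨PySem.Int.mod_nonneg _ h40, PySem.Int.mod_lt _ h40⟩
  have hnd : (PySem.List.pyRange 0 40 1).Nodup := by decide
  have hgetD : ∀ r : Int,
      (K.foldl (fun (d : PySem.Dict (Int × Int) Int) x => d.insert x (d.getD x 0 + 1)) PySem.Dict.empty).getD
        (r, PySem.List.pyGetD pat (PySem.Int.mod r (pat.length : Int)) 0) 0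
      = (K.count (r, PySem.List.pyGetD pat (PySem.Int.mod r (pat.length : Int)) 0) : Int) := by
    intro r
    rw [PySem.Dict.getD_foldl_insert_add_one]
    have : (PySem.Dict.empty : PySem.Dict (Int × Int) Int).getD
        (r, PySem.List.pyGetD pat (PySem.Int.mod r (pat.length : Int)) 0) 0 = 0 := rfl
    rw [this, zero_add]
  calc ((PySem.List.pyRange 0 40 1).map
      (fun r => (K.foldl (fun (d : PySem.Dict (Int × Int) Int) x => d.insert x (d.getD x 0 + 1)) PySem.Dict.empty).getD
        (r, PySem.List.pyGetD pat (PySem.Int.mod r (pat.length : Int)) 0) 0)).sum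
      = ((PySem.List.pyRange 0 40 1).map
        (fun r => (K.count (r, PySem.List.pyGetD pat (PySem.Int.mod r (pat.length : Int)) 0) : Int))).sum := by
        apply congrArg; apply List.map_congr_left; intro r _; exact hgetD r
    _ = (K.map (fun q => if q.2 = PySem.List.pyGetD pat (PySem.Int.mod q.1 (pat.length : Int)) 0 then (1:Int) else 0)).sum := by
        exact count_sum (fun r => PySem.List.pyGetD pat (PySem.Int.mod r (pat.length : Int)) 0) K _ hnd hmemK
    _ = (l.map (fun p => if p.2 = PySem.List.pyGetD pat (PySem.Int.mod p.1 (pat.length : Int)) 0 then (1:Int) else 0)).sum := by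
        rw [hK, List.map_map]
        apply congrArg
        apply List.map_congr_left
        intro p hp
        rcases (PySem.List.mem_enumerate_iff _ 0 _).mp hp with ⟨k, hk, hpe⟩
        have hfst : p.1 = (k : Int) := by rw [hpe]; simp
        have hmm : PySem.Int.mod (PySem.Int.mod p.1 40) (pat.length : Int) = PySem.Int.mod p.1 (pat.length : Int) := by
          rw [hfst]
          have h1 : PySem.Int.mod (k : Int) 40 = ((k % 40 : Nat) : Int) := by
            exact_mod_cast PySem.Int.mod_natCast k 40
          rw [h1]
          have h2 : PySem.Int.mod ((k % 40 : Nat) : Int) (pat.length : Int) = (((k % 40) % pat.length : Nat) : Int) :=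
            PySem.Int.mod_natCast (k % 40) pat.length
          have h3 : PySem.Int.mod (k : Int) (pat.length : Int) = ((k % pat.length : Nat) : Int) :=
            PySem.Int.mod_natCast k pat.length
          rw [h2, h3, Nat.mod_mod_of_dvd k hdvd]
        simp only [Function.comp_apply, hmm]
  -- done

-- A's result-building loop (recomputing max each step) equals B's filterMap over scores
lemma tail_eq (a b c : Int) :
    (PySem.List.enumerate [a,b,c] 0).foldl
      (fun (r : List Int) p => if p.2 = (PySem.List.max? [a,b,c] (fun y => y)).getD 0 then r ++ [p.1+1] else r) []
      = (PySem.List.enumerate [a,b,c] 0).filterMap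
      (fun p => if p.2 = PySem.List.maxD [a,b,c] (fun y => y) 0 then some (p.1+1) else none) := by
  have hm : (PySem.List.max? [a,b,c] (fun y => y)).getD 0 = PySem.List.maxD [a,b,c] (fun y => y) 0 := by
    simp [PySem.List.maxD]
  rw [hm]
  generalize PySem.List.maxD [a,b,c] (fun y => y) 0 = m
  simp [PySem.List.enumerate]
  split_ifs <;> simp_all

-- ===== VERDICT =====
theorem solution_spec : Claim_equal_solution := by
  intro answers _
  unfold Spec_solution solution solution_alt
  simp only [List.map_cons, List.map_nil]
  rw [fold_counts]
  simp only [zero_add]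
  simp only [score_eq [1,2,3,4,5] (by norm_num) answers,
      score_eq [2,1,2,3,2,4,2,5] (by norm_num) answers,
      score_eq [3,3,1,1,2,2,4,4,5,5] (by norm_num) answers]
  exact tail_eq _ _ _
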